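-- pv_equiv track=rewrite | github.com/Jangbo7/APS_challenge_mine | train_eff/compare_results.py | compare_predictions
-- ===== SOURCE A (Python) =====
-- from typing import Dict, List, Tuple
--
-- def compare_predictions(
--     preds_a: Dict[str, int],
--     preds_b: Dict[str, int],
-- ) -> Tuple[List[str], List[str], List[Tuple[str, int, int]], List[str]]:
--     names_a = set(preds_a.keys())
--     names_b = set(preds_b.keys())
--
--     only_in_a = sorted(names_a - names_b)
--     only_in_b = sorted(names_b - names_a)
--
--     same_pred: List[str] = []
--     different_pred: List[Tuple[str, int, int]] = []
--     for filename in sorted(names_a & names_b):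
--         pred_a = preds_a[filename]
--         pred_b = preds_b[filename]
--         if pred_a == pred_b:
--             same_pred.append(filename)
--         else:
--             different_pred.append((filename, pred_a, pred_b))
--
--     return only_in_a, only_in_b, different_pred, same_pred
-- ===== SOURCE B (Python) =====
-- def compare_predictions(preds_a, preds_b):
--     only_in_a, only_in_b, different_pred, same_pred = [], [], [], []
--     for name in sorted(preds_a.keys() | preds_b.keys()):
--         if name not in preds_b:
--             only_in_a.append(name)
--         elif name not in preds_a:
--             only_in_b.append(name)
--         else:
--             pa, pb = preds_a[name], preds_b[name]
--             if pa == pb: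
--                 same_pred.append(name)
--             else:
--                 different_pred.append((name, pa, pb))
--     return only_in_a, only_in_b, different_pred, same_pred
-- ===== Notes on version B (the rewrite author's own statement) =====
-- stated objective: simpler
-- what changed: B makes a single classifying pass over one sorted union of the key sets with a four-way branch, instead of A's three separately sorted set operations (two differences and an intersection) plus a comparison loop.
import Mathlib
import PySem

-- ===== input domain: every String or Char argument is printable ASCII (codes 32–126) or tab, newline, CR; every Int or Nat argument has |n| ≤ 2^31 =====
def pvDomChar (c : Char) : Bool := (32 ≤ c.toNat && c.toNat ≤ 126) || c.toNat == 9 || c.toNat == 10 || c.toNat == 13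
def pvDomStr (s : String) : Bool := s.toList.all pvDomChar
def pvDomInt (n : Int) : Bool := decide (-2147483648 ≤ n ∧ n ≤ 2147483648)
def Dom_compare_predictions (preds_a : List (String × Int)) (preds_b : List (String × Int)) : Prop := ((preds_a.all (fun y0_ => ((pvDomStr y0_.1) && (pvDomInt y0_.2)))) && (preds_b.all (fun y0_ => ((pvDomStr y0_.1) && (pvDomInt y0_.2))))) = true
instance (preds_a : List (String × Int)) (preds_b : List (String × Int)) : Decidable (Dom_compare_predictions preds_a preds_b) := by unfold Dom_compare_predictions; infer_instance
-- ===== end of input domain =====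

-- B replaces A's three separately sorted set operations + comparison loop by one classifying
-- pass over the sorted union of the keys (objective: simpler decomposition, same cost).

-- ===== PORT A =====
-- literal transliteration of A: set differences/intersection of the key sets, each sorted,
-- plus a loop over the sorted intersection splitting into same/different.
-- (preds_a[filename] is ported as getD _ 0: inside the loop the key is always present.)
def compare_predictions (preds_a : List (String × Int)) (preds_b : List (String × Int)) : List String × List String × (List (String × Int × Int)) × List String :=
  let da := PySem.Dict.ofList preds_a
  let db := PySem.Dict.ofList preds_b
  let names_a := PySem.Set.ofList da.keys
  let names_b := PySem.Set.ofList db.keys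
  let only_in_a := PySem.List.sorted (PySem.Set.diff names_a names_b) (fun x => x) false
  let only_in_b := PySem.List.sorted (PySem.Set.diff names_b names_a) (fun x => x) false
  let sd := (PySem.List.sorted (PySem.Set.inter names_a names_b) (fun x => x) false).foldl
      (fun (st : List String × List (String × Int × Int)) filename =>
        let pred_a := da.getD filename 0
        let pred_b := db.getD filename 0
        if pred_a = pred_b then (st.1 ++ [filename], st.2)
        else (st.1, st.2 ++ [(filename, pred_a, pred_b)]))
      ([], [])
  (only_in_a, only_in_b, sd.2, sd.1)

-- ===== PORT B =====
-- literal transliteration of B: one fold over the sorted union of the keys with a four-way branch.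
def compare_predictions_alt (preds_a : List (String × Int)) (preds_b : List (String × Int)) : List String × List String × (List (String × Int × Int)) × List String :=
  let da := PySem.Dict.ofList preds_a
  let db := PySem.Dict.ofList preds_b
  (PySem.List.sorted (PySem.Set.union (PySem.Set.ofList da.keys) db.keys) (fun x => x) false).foldl
    (fun (st : List String × List String × List (String × Int × Int) × List String) name =>
      if db.contains name = false then (st.1 ++ [name], st.2.1, st.2.2.1, st.2.2.2)
      else if da.contains name = false then (st.1, st.2.1 ++ [name], st.2.2.1, st.2.2.2)
      else
        let pa := da.getD name 0
        let pb := db.getD name 0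
        if pa = pb then (st.1, st.2.1, st.2.2.1, st.2.2.2 ++ [name])
        else (st.1, st.2.1, st.2.2.1 ++ [(name, pa, pb)], st.2.2.2))
    ([], [], [], [])

-- ===== PRECONDITION & SPEC =====
def Spec_compare_predictions (preds_a : List (String × Int)) (preds_b : List (String × Int)) (out : List String × List String × (List (String × Int × Int)) × List String) : Prop := out = compare_predictions_alt preds_a preds_b
instance (preds_a : List (String × Int)) (preds_b : List (String × Int)) (out : List String × List String × (List (String × Int × Int)) × List String) : Decidable (Spec_compare_predictions preds_a preds_b out) := by unfold Spec_compare_predictions; infer_instance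

-- ===== CLAIM =====
def Claim_equal_compare_predictions : Prop := ∀ (preds_a : List (String × Int)) (preds_b : List (String × Int)), Dom_compare_predictions preds_a preds_b → Spec_compare_predictions preds_a preds_b (compare_predictions preds_a preds_b)

-- ===== LEMMAS AND PROOFS =====

-- B's four-bucket fold, characterised componentwise as filters of the traversed list.
theorem fold4_spec (da db : PySem.Dict String Int) (U : List String)
    (l1 l4 : List String) (l2 : List String) (l3 : List (String × Int × Int)) :
    U.foldl
      (fun (st : List String × List String × List (String × Int × Int) × List String) name =>
        if db.contains name = false then (st.1 ++ [name], st.2.1, st.2.2.1, st.2.2.2)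
        else if da.contains name = false then (st.1, st.2.1 ++ [name], st.2.2.1, st.2.2.2)
        else
          let pa := da.getD name 0
          let pb := db.getD name 0
          if pa = pb then (st.1, st.2.1, st.2.2.1, st.2.2.2 ++ [name])
          else (st.1, st.2.1, st.2.2.1 ++ [(name, pa, pb)], st.2.2.2))
      (l1, l2, l3, l4)
    = (l1 ++ U.filter (fun n => !db.contains n),
       l2 ++ U.filter (fun n => db.contains n && !da.contains n),
       l3 ++ (U.filter (fun n => db.contains n && da.contains n
                && !(decide (da.getD n 0 = db.getD n 0)))).map
              (fun n => (n, da.getD n 0, db.getD n 0)),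
       l4 ++ U.filter (fun n => db.contains n && da.contains n
                && decide (da.getD n 0 = db.getD n 0))) := by
  induction U generalizing l1 l2 l3 l4 with
  | nil => simp
  | cons x t ih =>
    simp only [List.foldl_cons, List.filter_cons]
    by_cases hb : db.contains x
    · by_cases ha : da.contains x
      · by_cases he : da.getD x 0 = db.getD x 0 <;>
          simp [hb, ha, he, ih, List.append_assoc]
      · simp [hb, ha, ih, List.append_assoc]
    · simp [hb, ih, List.append_assoc]

-- A's same/different loop, characterised as a filter and a filtered map.
theorem fold2_pv (da db : PySem.Dict String Int) (I : List String)
    (s : List String) (d : List (String × Int × Int)) :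
    I.foldl
      (fun (st : List String × List (String × Int × Int)) filename =>
        let pred_a := da.getD filename 0
        let pred_b := db.getD filename 0
        if pred_a = pred_b then (st.1 ++ [filename], st.2)
        else (st.1, st.2 ++ [(filename, pred_a, pred_b)]))
      (s, d)
    = (s ++ I.filter (fun n => decide (da.getD n 0 = db.getD n 0)),
       d ++ (I.filter (fun n => !(decide (da.getD n 0 = db.getD n 0)))).map
              (fun n => (n, da.getD n 0, db.getD n 0))) := by
  induction I generalizing s d with
  | nil => simp
  | cons x t ih =>
    simp only [List.foldl_cons, List.filter_cons]
    by_cases he : da.getD x 0 = db.getD x 0 <;> simp [he, ih, List.append_assoc]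

theorem pairwise_lt_of_le_nodup (l : List String)
    (h1 : l.Pairwise (· ≤ ·)) (h2 : l.Nodup) : l.Pairwise (· < ·) := by
  have := List.Pairwise.and h1 h2
  exact this.imp (fun h => lt_of_le_of_ne h.1 h.2)

-- sorted(t) equals the p-filter of the sorted nodup list u, whenever p carves exactly t out of u.
theorem sorted_eq_filter_sorted (u t : List String) (p : String → Bool)
    (hu : u.Nodup) (ht : t.Nodup)
    (hmem : ∀ x, (x ∈ u ∧ p x = true) ↔ x ∈ t) :
    PySem.List.sorted t (fun x => x) false
      = (PySem.List.sorted u (fun x => x) false).filter p := by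
  have hperm : (PySem.List.sorted u (fun x => x) false).Perm u :=
    PySem.List.sorted_perm u (fun x => x) false
  have hUnd : (PySem.List.sorted u (fun x => x) false).Nodup := hperm.nodup_iff.mpr hu
  have hlt : ((PySem.List.sorted u (fun x => x) false).filter p).Pairwise (· < ·) :=
    (pairwise_lt_of_le_nodup _ (PySem.List.sorted_pairwise u (fun x => x)) hUnd).filter p
  refine PySem.List.sorted_eq_of_perm_of_pairwise_lt t _ (fun x => x) ?_ hlt
  refine (List.perm_ext_iff_of_nodup (hUnd.filter p) ht).mpr ?_
  intro x
  rw [List.mem_filter, hperm.mem_iff, hmem]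

-- ===== VERDICT (by name: the statement is the Claim_ definition above) =====
theorem compare_predictions_spec : Claim_equal_compare_predictions := by
  intro preds_a preds_b _
  unfold Spec_compare_predictions compare_predictions compare_predictions_alt
  simp only []
  set da := PySem.Dict.ofList preds_a with hda
  set db := PySem.Dict.ofList preds_b with hdb
  have hKa : da.keys.Nodup := PySem.Dict.nodup_keys_ofList preds_a
  have hKb : db.keys.Nodup := PySem.Dict.nodup_keys_ofList preds_b
  have hNa : (PySem.Set.ofList da.keys).Nodup := PySem.Set.nodup_ofList _
  have hNb : (PySem.Set.ofList db.keys).Nodup := PySem.Set.nodup_ofList _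
  have hU : (PySem.Set.union (PySem.Set.ofList da.keys) db.keys).Nodup :=
    PySem.Set.nodup_union _ _ hNa
  have hca : ∀ x, da.contains x = true ↔ x ∈ PySem.Set.ofList da.keys := by
    intro x; rw [PySem.Dict.contains_iff_mem_keys, PySem.Set.mem_ofList]
  have hcb : ∀ x, db.contains x = true ↔ x ∈ PySem.Set.ofList db.keys := by
    intro x; rw [PySem.Dict.contains_iff_mem_keys, PySem.Set.mem_ofList]
  have hmemU : ∀ x, x ∈ PySem.Set.union (PySem.Set.ofList da.keys) db.keys ↔
      x ∈ PySem.Set.ofList da.keys ∨ x ∈ PySem.Set.ofList db.keys := by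
    intro x; simp [PySem.Set.mem_union, PySem.Set.mem_ofList]
  rw [fold4_spec, fold2_pv]
  -- bucket 1
  have h1 : PySem.List.sorted (PySem.Set.diff (PySem.Set.ofList da.keys) (PySem.Set.ofList db.keys)) (fun x => x) false
      = (PySem.List.sorted (PySem.Set.union (PySem.Set.ofList da.keys) db.keys) (fun x => x) false).filter
          (fun n => !db.contains n) := by
    refine sorted_eq_filter_sorted _ _ _ hU (PySem.Set.nodup_diff _ _ hNa) ?_
    intro x
    rw [PySem.Set.mem_diff, hmemU]
    simp only [Bool.not_eq_true', ← Bool.not_eq_true, hcb x]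
    tauto
  -- bucket 2
  have h2 : PySem.List.sorted (PySem.Set.diff (PySem.Set.ofList db.keys) (PySem.Set.ofList da.keys)) (fun x => x) false
      = (PySem.List.sorted (PySem.Set.union (PySem.Set.ofList da.keys) db.keys) (fun x => x) false).filter
          (fun n => db.contains n && !da.contains n) := by
    refine sorted_eq_filter_sorted _ _ _ hU (PySem.Set.nodup_diff _ _ hNb) ?_
    intro x
    rw [PySem.Set.mem_diff, hmemU]
    simp only [Bool.and_eq_true, Bool.not_eq_true', ← Bool.not_eq_true, hca x, hcb x]
    tauto
  -- intersection, as a filter of the sorted union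
  have hI : PySem.List.sorted (PySem.Set.inter (PySem.Set.ofList da.keys) (PySem.Set.ofList db.keys)) (fun x => x) false
      = (PySem.List.sorted (PySem.Set.union (PySem.Set.ofList da.keys) db.keys) (fun x => x) false).filter
          (fun n => db.contains n && da.contains n) := by
    refine sorted_eq_filter_sorted _ _ _ hU (PySem.Set.nodup_inter _ _ hNa) ?_
    intro x
    rw [PySem.Set.mem_inter, hmemU]
    simp only [Bool.and_eq_true, hca x, hcb x]
    tauto
  rw [h1, h2, hI]
  simp only [List.nil_append, List.filter_filter]
  have hp3 : (fun a => !decide (da.getD a 0 = db.getD a 0) && (db.contains a && da.contains a))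
      = (fun n => db.contains n && da.contains n && !decide (da.getD n 0 = db.getD n 0)) :=
    funext fun n => by cases db.contains n <;> cases da.contains n <;> simp
  have hp4 : (fun a => decide (da.getD a 0 = db.getD a 0) && (db.contains a && da.contains a))
      = (fun n => db.contains n && da.contains n && decide (da.getD n 0 = db.getD n 0)) :=
    funext fun n => by cases db.contains n <;> cases da.contains n <;> simp
  rw [hp3, hp4]
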